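-- pv_equiv track=rewrite | github.com/DataDavD/ds_interview_python | ds_coding_interviews_in_python/ch2lists/chlg9_rearrange_pos_neg.py | rearrange_aux_lists
-- ===== SOURCE A (Python) =====
-- from typing import List
--
-- def rearrange_aux_lists(lst: List[int]) -> List[int]:
--     if len(lst) <= 1:
--         return lst
--     neg = []
--     pos = []
--     # make a list of negative and positive numbers
--     for ele in lst:
--         if ele < 0:
--             neg.append(ele)
--         else:
--             pos.append(ele)
--     # merge two lists and return
--     return neg + pos
-- ===== SOURCE B (Python) =====
-- def rearrange_aux_lists(lst):
--     if len(lst) <= 1: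
--         return lst
--     # stable sort on a boolean key: negatives (False) come before non-negatives (True),
--     # ties keep their original order -> a stable partition
--     return sorted(lst, key=lambda x: x >= 0)
-- ===== Notes on version B (the rewrite author's own statement) =====
-- stated objective: idiomatic
-- what changed: Replaces the explicit two-bucket accumulation loop with a single stable sort on the boolean key x >= 0, whose stability yields the same partition order.
import Mathlib
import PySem

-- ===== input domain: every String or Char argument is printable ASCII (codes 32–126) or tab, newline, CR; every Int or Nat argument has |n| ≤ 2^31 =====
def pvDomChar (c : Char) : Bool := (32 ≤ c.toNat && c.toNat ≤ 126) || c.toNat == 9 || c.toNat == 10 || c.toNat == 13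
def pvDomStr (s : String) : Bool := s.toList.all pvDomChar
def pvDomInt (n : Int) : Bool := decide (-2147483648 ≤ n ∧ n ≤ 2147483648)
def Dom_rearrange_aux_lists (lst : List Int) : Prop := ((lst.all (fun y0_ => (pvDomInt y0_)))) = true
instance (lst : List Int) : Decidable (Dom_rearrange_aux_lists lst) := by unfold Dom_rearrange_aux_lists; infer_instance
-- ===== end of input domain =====

-- B replaces A's two-bucket accumulation loop by a single stable sort on the boolean key x >= 0 (idiomatic; same return values).


-- ===== PORT A =====
def rearrange_aux_lists (lst : List Int) : List Int :=
  if lst.length ≤ 1 then lst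
  else
    let r := lst.foldl
      (fun (acc : List Int × List Int) ele =>
        if ele < 0 then (acc.1 ++ [ele], acc.2) else (acc.1, acc.2 ++ [ele]))
      ([], [])
    r.1 ++ r.2

-- ===== PORT B =====
def rearrange_aux_lists_alt (lst : List Int) : List Int :=
  if lst.length ≤ 1 then lst
  else PySem.List.sorted lst (fun x => decide (0 ≤ x)) false

-- ===== PRECONDITION & SPEC =====
def Spec_rearrange_aux_lists (lst : List Int) (out : List Int) : Prop := out = rearrange_aux_lists_alt lst
instance (lst : List Int) (out : List Int) : Decidable (Spec_rearrange_aux_lists lst out) := by unfold Spec_rearrange_aux_lists; infer_instance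

-- ===== CLAIM (what is proved, stated in full; the proofs are below) =====
def Claim_equal_rearrange_aux_lists : Prop := ∀ (lst : List Int), Dom_rearrange_aux_lists lst → Spec_rearrange_aux_lists lst (rearrange_aux_lists lst)

-- ===== LEMMAS AND PROOFS =====

-- inserting a non-negative element (key true) never goes before anything: it lands at the end
lemma insertBy_nonneg (x : Int) (hx : 0 ≤ x) (l : List Int) :
    PySem.List.insertBy (fun a b => decide ((fun y => decide (0 ≤ y)) a < (fun y => decide (0 ≤ y)) b)) x l
      = l ++ [x] := by
  induction l with
  | nil => rfl
  | cons y ys ih =>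
    simp only [PySem.List.insertBy]
    have : (decide ((decide (0 ≤ x)) < (decide (0 ≤ y)))) = false := by
      simp [hx]
    simp [this, ih]

-- inserting a negative element (key false) skips the negatives and lands before the first non-negative
lemma insertBy_neg (x : Int) (hx : x < 0) (negs poss : List Int)
    (hn : ∀ y ∈ negs, y < 0) (hp : ∀ y ∈ poss, 0 ≤ y) :
    PySem.List.insertBy (fun a b => decide ((fun y => decide (0 ≤ y)) a < (fun y => decide (0 ≤ y)) b)) x (negs ++ poss)
      = negs ++ x :: poss := by
  induction negs with
  | nil =>
    cases poss with
    | nil => rfl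
    | cons z zs =>
      have hz := hp z (by simp)
      simp only [List.nil_append, PySem.List.insertBy]
      have hx' : ¬ (0 ≤ x) := by omega
      have : (decide ((decide (0 ≤ x)) < (decide (0 ≤ z)))) = true := by
        simp [hz, hx']
      simp [this]
  | cons y ys ih =>
    have hy := hn y (by simp)
    simp only [List.cons_append, PySem.List.insertBy]
    have h1 : (decide ((decide (0 ≤ x)) < (decide (0 ≤ y)))) = false := by
      have : ¬ (0 ≤ y) := by omega
      simp [this]
    simp only [h1, if_neg Bool.false_ne_true]
    simp only [ih (fun z hz => hn z (by simp [hz]))]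

-- the insertion-sort fold over a partitioned accumulator keeps it partitioned, stably
lemma foldl_insert_partition (xs : List Int) : ∀ (negs poss : List Int),
    (∀ y ∈ negs, y < 0) → (∀ y ∈ poss, 0 ≤ y) →
    xs.foldl
      (fun acc x => PySem.List.insertBy (fun a b => decide ((fun y => decide (0 ≤ y)) a < (fun y => decide (0 ≤ y)) b)) x acc)
      (negs ++ poss)
      = (negs ++ xs.filter (fun x => decide (x < 0))) ++ (poss ++ xs.filter (fun x => !decide (x < 0))) := by
  induction xs with
  | nil => intro negs poss _ _; simp
  | cons x xs ih =>
    intro negs poss hn hp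
    by_cases hx : x < 0
    · simp only [List.foldl_cons, insertBy_neg x hx negs poss hn hp]
      have : negs ++ x :: poss = (negs ++ [x]) ++ poss := by simp
      rw [this, ih (negs ++ [x]) poss
        (by intro y hy; rcases List.mem_append.1 hy with h | h
            · exact hn y h
            · simp at h; omega) hp]
      simp [hx]
    · have hx' : 0 ≤ x := by omega
      have : PySem.List.insertBy (fun a b => decide ((fun y => decide (0 ≤ y)) a < (fun y => decide (0 ≤ y)) b)) x (negs ++ poss)
          = negs ++ (poss ++ [x]) := by
        rw [insertBy_nonneg x hx', List.append_assoc]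
      simp only [List.foldl_cons, this]
      rw [ih negs (poss ++ [x]) hn
        (by intro y hy; rcases List.mem_append.1 hy with h | h
            · exact hp y h
            · simp at h; omega)]
      simp [hx]

-- A's two-bucket fold computes the two filters
lemma foldl_buckets (xs : List Int) : ∀ (a b : List Int),
    xs.foldl
      (fun (acc : List Int × List Int) ele =>
        if ele < 0 then (acc.1 ++ [ele], acc.2) else (acc.1, acc.2 ++ [ele])) (a, b)
      = (a ++ xs.filter (fun x => decide (x < 0)), b ++ xs.filter (fun x => !decide (x < 0))) := by
  induction xs with
  | nil => intro a b; simp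
  | cons x xs ih =>
    intro a b
    by_cases hx : x < 0 <;> simp [hx, ih]

-- ===== VERDICT (by name: the statement is the Claim_ definition above) =====
theorem rearrange_aux_lists_spec : Claim_equal_rearrange_aux_lists := by
  intro lst _
  unfold Spec_rearrange_aux_lists rearrange_aux_lists rearrange_aux_lists_alt
  by_cases h : lst.length ≤ 1
  · simp [h]
  · simp only [h, if_false]
    rw [PySem.List.sorted_eq_foldl_insertBy]
    have := foldl_insert_partition lst [] [] (by simp) (by simp)
    simp only [List.nil_append] at this
    rw [this, foldl_buckets]
    simp
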